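-- pv_equiv track=rewrite | github.com/stavrosgns/UniversityProject | Cryptography/Vigenere.py | sortedTabulaRecta
-- ===== SOURCE A (Python) =====
-- def Ascii2Zset(plaintext):
--     if(plaintext.isupper()):
--         return [ord(x)-65 for x in plaintext]
--     return [ord(x)-97 for x in plaintext]
--
-- def mappingSortedOrder(key):
--     if(isinstance(key,str)):
--         sortedOrder = [x+1 for x in range(len(key))]
--         return "".join([chr(x+65) for x in sortedOrder]), "".join(sorted(list(key)))
--
-- def sortedTabulaRecta(message,key):
--     #Begin of precomputed variables
--     plainText = Ascii2Zset(message)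
--     messageLength = len(plainText)
--
--     keyLength = len(key)
--     asciiKey = Ascii2Zset(key)
--
--     mapping, sortedList = mappingSortedOrder(key)
--     #End of precomputed variables
--
--     #CEMOPRTU    --> COMPUTER
--     #BCDEFGHI    --> BEDFIHCG
--
--     aux = [mapping[sortedList.index(key[x])] for x in range(len(key))]
--     newKey = Ascii2Zset("".join(aux))
--
--     return [((newKey[x % len(newKey)] + plainText[x]) % 26) for x in range(len(plainText))]
-- ===== SOURCE B (Python) =====
-- def sortedTabulaRecta(message, key):
--     # Argsort: one stable sort of the key POSITIONS by their character, then a single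
--     # linear sweep over that order assigning each position the start index of its run
--     # of equal characters (= first-occurrence index in the sorted key). No sorted
--     # character string is kept and no per-position .index scan happens.
--     order = sorted(range(len(key)), key=lambda i: key[i])
--     rank = [0] * len(key)
--     start = 0
--     prev = None
--     j = 0
--     for pos in order:
--         c = key[pos]
--         if prev is not None and c != prev:
--             start = j
--         rank[pos] = start
--         prev = c
--         j += 1
--     aux = "".join(chr(66 + r) for r in rank)
--     koff = 65 if aux.isupper() else 97
--     moff = 65 if message.isupper() else 97
--     newKey = [ord(c) - koff for c in aux]
--     k = len(newKey)
--     out = []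
--     i = 0
--     for ch in message:
--         out.append((newKey[i] + ord(ch) - moff) % 26)
--         i = i + 1 if i + 1 < k else 0
--     return out
-- ===== Notes on version B (the rewrite author's own statement) =====
-- stated objective: faster
-- what changed: B replaces A's 'sort the key characters then run a sortedList.index scan for every key position' by one argsort of the key POSITIONS plus a single linear sweep over that order that assigns each position its run-start index (= first-occurrence index in the sorted key), and replaces the final x % len(newKey) indexed comprehension by a loop with a cycling index.
import Mathlib
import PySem

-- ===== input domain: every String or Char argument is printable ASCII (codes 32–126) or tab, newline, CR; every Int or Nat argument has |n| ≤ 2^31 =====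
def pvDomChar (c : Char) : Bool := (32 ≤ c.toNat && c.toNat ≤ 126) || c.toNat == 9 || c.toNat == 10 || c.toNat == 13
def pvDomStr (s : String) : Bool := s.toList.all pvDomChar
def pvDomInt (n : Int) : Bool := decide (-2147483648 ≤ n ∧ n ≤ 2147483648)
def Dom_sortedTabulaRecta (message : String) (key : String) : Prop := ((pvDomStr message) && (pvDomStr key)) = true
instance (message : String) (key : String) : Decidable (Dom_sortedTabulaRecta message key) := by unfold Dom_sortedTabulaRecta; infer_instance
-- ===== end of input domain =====

-- ===== PORT A =====
-- B replaces A's character sort + per-position .index scans by ONE argsort of the key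
-- positions and a single linear sweep assigning run-start ranks, and the final
-- x % len(newKey) comprehension by a cycling-index loop; equal on Pre_ (outside Pre_
-- both Pythons raise).

-- str.isupper(): at least one cased character and no lowercase one (exact on the ASCII domain)
def pyStrIsupper (cs : List Char) : Bool :=
  cs.any (fun c => PySem.Chars.isupper c || PySem.Chars.islower c) &&
  cs.all (fun c => !PySem.Chars.islower c)

def ascii2Zset (cs : List Char) : List Int :=
  if pyStrIsupper cs then cs.map (fun c => (c.toNat : Int) - 65)
  else cs.map (fun c => (c.toNat : Int) - 97)

def mappingSortedOrder (kcs : List Char) : List Char × List Char :=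
  let sortedOrder := (List.range kcs.length).map (fun x => x + 1)
  (sortedOrder.map (fun x => Char.ofNat (x + 65)), PySem.List.sorted kcs (fun c => c) false)

def sortedTabulaRecta (message : String) (key : String) : List Int :=
  let plainText := ascii2Zset message.toList
  let kcs := key.toList
  let mp := mappingSortedOrder kcs
  let mapping := mp.1
  let sortedList := mp.2
  -- aux = [mapping[sortedList.index(key[x])] for x in range(len(key))]; the index/getD lookups
  -- never go out of range on the inputs reached under Pre_ (key[x] ∈ sortedList, a permutation of key)
  let aux := (List.range kcs.length).map (fun x =>
    mapping.getD ((PySem.List.index? sortedList (kcs.getD x ' ')).getD 0) ' ')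
  let newKey := ascii2Zset aux
  (List.range plainText.length).map (fun x =>
    PySem.Int.mod (newKey.getD (x % newKey.length) 0 + plainText.getD x 0) 26)

-- ===== PORT B =====
-- loop body of B's sweep over the argsorted positions; state = (rank, start, prev, j)
def sweepStep (kcs : List Char) (st : List Nat × Nat × Option Char × Nat) (pos : Nat) :
    List Nat × Nat × Option Char × Nat :=
  let c := kcs.getD pos ' '
  let start :=
    match st.2.2.1 with
    | some p => if c ≠ p then st.2.2.2 else st.2.1
    | none => st.2.1
  (st.1.set pos start, start, some c, st.2.2.2 + 1)

-- B's final loop: for ch in message with a cycling index i into newKey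
def vigLoopB (newKey : List Int) (moff : Int) : List Char → Nat → List Int
  | [], _ => []
  | ch :: rest, i =>
      PySem.Int.mod (newKey.getD i 0 + ((ch.toNat : Int) - moff)) 26 ::
      vigLoopB newKey moff rest (if i + 1 < newKey.length then i + 1 else 0)

def sortedTabulaRecta_alt (message : String) (key : String) : List Int :=
  let kcs := key.toList
  -- order = sorted(range(len(key)), key=lambda i: key[i])
  let order := PySem.List.sorted (List.range kcs.length) (fun i => kcs.getD i ' ') false
  let rank := (order.foldl (sweepStep kcs) (List.replicate kcs.length 0, 0, none, 0)).1
  let aux := rank.map (fun r => Char.ofNat (66 + r))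
  let koff : Int := if pyStrIsupper aux then 65 else 97
  let moff : Int := if pyStrIsupper message.toList then 65 else 97
  let newKey := aux.map (fun c => (c.toNat : Int) - koff)
  vigLoopB newKey moff message.toList 0

-- ===== PRECONDITION & SPEC =====
-- Pre_ excludes only key = "" with a nonempty message, where Python A raises ZeroDivisionError
-- (x % len(newKey) with len(newKey) = 0) and Python B raises IndexError.
def Pre_sortedTabulaRecta (message : String) (key : String) : Prop :=
  key.toList ≠ [] ∨ message.toList = []
instance (message : String) (key : String) : Decidable (Pre_sortedTabulaRecta message key) := by
  unfold Pre_sortedTabulaRecta; infer_instance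

def pvWitness_sortedTabulaRecta : String × String := ("Attack at dawn", "Computer")

def Spec_sortedTabulaRecta (message : String) (key : String) (out : List Int) : Prop := out = sortedTabulaRecta_alt message key
instance (message : String) (key : String) (out : List Int) : Decidable (Spec_sortedTabulaRecta message key out) := by unfold Spec_sortedTabulaRecta; infer_instance

-- ===== CLAIM (what is proved, stated in full; the proofs are below) =====
def Claim_equal_sortedTabulaRecta : Prop := ∀ (message : String) (key : String), Dom_sortedTabulaRecta message key → Pre_sortedTabulaRecta message key → Spec_sortedTabulaRecta message key (sortedTabulaRecta message key)

-- ===== LEMMAS AND PROOFS =====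

lemma ascii2Zset_eq_map (cs : List Char) :
    ascii2Zset cs = cs.map (fun c => (c.toNat : Int) - (if pyStrIsupper cs then 65 else 97)) := by
  unfold ascii2Zset; split <;> rfl

-- first-occurrence index of c in a ≤-sorted list = number of elements strictly below c
lemma index?_pairwise_eq_countP (s : List Char) (c : Char)
    (hs : s.Pairwise (· ≤ ·)) (hc : c ∈ s) :
    PySem.List.index? s c = some (s.countP (fun x => decide (x < c))) := by
  induction s with
  | nil => cases hc
  | cons a t ih =>
    rcases List.pairwise_cons.mp hs with ⟨ha, ht⟩
    by_cases hac : a = c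
    · subst hac
      have h0 : t.countP (fun x => decide (x < a)) = 0 := by
        rw [List.countP_eq_zero]
        intro x hx
        simpa using not_lt.mpr (ha x hx)
      rw [PySem.List.index?_cons_self]
      simp [h0]
    · have hct : c ∈ t := by
        rcases List.mem_cons.mp hc with h | h
        · exact absurd h.symm hac
        · exact h
      have hlt : a < c := lt_of_le_of_ne (ha c hct) hac
      rw [PySem.List.index?_cons_of_ne t hac, ih ht hct]
      simp [hlt, Nat.add_comm]

lemma index?_sorted_eq_countP (l : List Char) (c : Char) (hc : c ∈ l) :
    PySem.List.index? (PySem.List.sorted l (fun x => x) false) c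
      = some (l.countP (fun x => decide (x < c))) := by
  have hperm : (PySem.List.sorted l (fun x => x) false).Perm l := PySem.List.sorted_perm l _ _
  have hp : (PySem.List.sorted l (fun x => x) false).Pairwise (· ≤ ·) := by
    simpa using PySem.List.sorted_pairwise l (fun x => x)
  rw [index?_pairwise_eq_countP _ c hp (by rw [hperm.mem_iff]; exact hc), hperm.countP_eq]

lemma countP_lt_length_of_mem (l : List Char) (c : Char) (hc : c ∈ l) :
    l.countP (fun x => decide (x < c)) < l.length := by
  apply List.countP_lt_length_iff.mpr
  exact ⟨c, hc, by simp⟩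

-- A's aux string (sort, then index-scan per position) in closed form: rank = strictly-below count
lemma aux_A_eq_countP (kcs : List Char) :
    (List.range kcs.length).map (fun x =>
        (mappingSortedOrder kcs).1.getD
          ((PySem.List.index? (mappingSortedOrder kcs).2 (kcs.getD x ' ')).getD 0) ' ')
      = kcs.map (fun kc => Char.ofNat (66 + kcs.countP (fun c => decide (c < kc)))) := by
  apply List.ext_getElem
  · simp
  · intro i h1 h2
    simp only [List.getElem_map, List.getElem_range, mappingSortedOrder]
    have hi : i < kcs.length := by simpa using h1
    rw [List.getD_eq_getElem _ _ hi]
    rw [index?_sorted_eq_countP kcs kcs[i] (List.getElem_mem hi)]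
    have hr : kcs.countP (fun x => decide (x < kcs[i])) < kcs.length :=
      countP_lt_length_of_mem kcs kcs[i] (List.getElem_mem hi)
    simp only [Option.getD_some]
    rw [List.getD_eq_getElem _ _ (by simpa using hr)]
    simp only [List.getElem_map, List.getElem_range]
    congr 1
    omega

-- the sweep invariant: folding B's loop body over the not-yet-seen tail `suf` of the
-- argsorted order writes, at every position of `suf`, the count of key characters
-- strictly below that position's character (= first-occurrence index in the sorted key)
lemma sweep_inv (kcs : List Char) :
    ∀ (suf pre : List Nat) (rank : List Nat) (start : Nat) (prev : Option Char),
      ((pre ++ suf).map (fun a => kcs.getD a ' ')).Pairwise (· ≤ ·) →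
      ((pre ++ suf).map (fun a => kcs.getD a ' ')).Perm kcs →
      (∀ b ∈ suf, b < rank.length) →
      (prev = none → pre = [] ∧ start = 0) →
      (∀ p, prev = some p →
        (∀ b ∈ pre, kcs.getD b ' ' ≤ p) ∧ (∀ a ∈ suf, p ≤ kcs.getD a ' ') ∧
        start = kcs.countP (fun x => decide (x < p))) →
      ((suf.foldl (sweepStep kcs) (rank, start, prev, pre.length)).1).length = rank.length ∧
      ∀ i, ((suf.foldl (sweepStep kcs) (rank, start, prev, pre.length)).1)[i]?
          = if i ∈ suf then some (kcs.countP (fun x => decide (x < kcs.getD i ' '))) else rank[i]? := by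
  intro suf
  induction suf with
  | nil =>
    intro pre rank start prev _ _ _ _ _
    simp
  | cons a suf' ih =>
    intro pre rank start prev hpair hperm hbnd hnone hsome
    -- pairwise on the (a :: suf') part
    have hsub : ((a :: suf').map (fun b => kcs.getD b ' ')).Sublist
        ((pre ++ a :: suf').map (fun b => kcs.getD b ' ')) :=
      (List.sublist_append_right pre (a :: suf')).map _
    have hpt := List.pairwise_cons.mp (hpair.sublist hsub)
    have hsuf_ge : ∀ b ∈ suf', kcs.getD a ' ' ≤ kcs.getD b ' ' := by
      intro b hb
      exact hpt.1 _ (List.mem_map_of_mem hb)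
    have ha_lt : a < rank.length := hbnd a List.mem_cons_self
    -- one step of the fold writes the strictly-below count of a's character
    have hstep : sweepStep kcs (rank, start, prev, pre.length) a
        = (rank.set a (kcs.countP (fun x => decide (x < kcs.getD a ' '))),
           kcs.countP (fun x => decide (x < kcs.getD a ' ')),
           some (kcs.getD a ' '), pre.length + 1) := by
      cases prev with
      | none =>
        obtain ⟨hpre0, hst0⟩ := hnone rfl
        subst hpre0
        have h0 : kcs.countP (fun x => decide (x < kcs.getD a ' ')) = 0 := by
          rw [← hperm.countP_eq, List.countP_eq_zero]
          intro x hx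
          simp only [List.nil_append, List.map_cons, List.mem_cons] at hx
          rcases hx with rfl | hx
          · simp
          · rcases List.mem_map.mp hx with ⟨b, hb, rfl⟩
            simpa using not_lt.mpr (hsuf_ge b hb)
        simp only [sweepStep]
        rw [hst0, h0]
      | some p =>
        obtain ⟨hpre_le, hge, hst⟩ := hsome p rfl
        have hpc : p ≤ kcs.getD a ' ' := hge a List.mem_cons_self
        by_cases hcp : kcs.getD a ' ' = p
        · simp only [sweepStep]
          rw [if_neg (not_not_intro hcp), hcp, hst]
        · have hplt : p < kcs.getD a ' ' := lt_of_le_of_ne hpc (fun h => hcp h.symm)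
          have hcount : kcs.countP (fun x => decide (x < kcs.getD a ' ')) = pre.length := by
            rw [← hperm.countP_eq, List.map_append, List.countP_append]
            have h1 : (pre.map (fun b => kcs.getD b ' ')).countP
                (fun x => decide (x < kcs.getD a ' '))
                = (pre.map (fun b => kcs.getD b ' ')).length := by
              rw [List.countP_eq_length]
              intro x hx
              rcases List.mem_map.mp hx with ⟨b, hb, rfl⟩
              simpa using lt_of_le_of_lt (hpre_le b hb) hplt
            have h2 : ((a :: suf').map (fun b => kcs.getD b ' ')).countP
                (fun x => decide (x < kcs.getD a ' ')) = 0 := by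
              rw [List.countP_eq_zero]
              intro x hx
              simp only [List.map_cons, List.mem_cons] at hx
              rcases hx with rfl | hx
              · simp
              · rcases List.mem_map.mp hx with ⟨b, hb, rfl⟩
                simpa using not_lt.mpr (hsuf_ge b hb)
            rw [h1, h2, List.length_map]
            omega
          simp only [sweepStep]
          rw [if_pos hcp, hcount]
    have hassoc : (pre ++ [a]) ++ suf' = pre ++ a :: suf' := by simp
    have hIH := ih (pre ++ [a]) (rank.set a (kcs.countP (fun x => decide (x < kcs.getD a ' '))))
        (kcs.countP (fun x => decide (x < kcs.getD a ' '))) (some (kcs.getD a ' '))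
        (by rw [hassoc]; exact hpair)
        (by rw [hassoc]; exact hperm)
        (by intro b hb; rw [List.length_set]; exact hbnd b (List.mem_cons_of_mem a hb))
        (by intro h; cases h)
        (by
          intro p hp
          injection hp with hp; subst hp
          refine ⟨?_, hsuf_ge, rfl⟩
          intro b hb
          rcases List.mem_append.mp hb with hb | hb
          · cases prev with
            | none => rw [(hnone rfl).1] at hb; cases hb
            | some q =>
              obtain ⟨hpre_le, hge, _⟩ := hsome q rfl
              exact le_trans (hpre_le b hb) (hge a List.mem_cons_self)
          · rcases List.mem_singleton.mp hb with rfl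
            exact le_refl _)
    rw [List.foldl_cons, hstep,
      (by simp : pre.length + 1 = (pre ++ [a]).length)]
    refine ⟨by rw [hIH.1, List.length_set], ?_⟩
    intro i
    rw [hIH.2 i]
    by_cases hi : i ∈ suf'
    · simp [hi, List.mem_cons_of_mem a hi]
    · by_cases hia : i = a
      · subst hia
        simp [hi, List.getElem?_set_self ha_lt]
      · simp [hi, hia, List.getElem?_set_ne (fun h => hia h.symm)]

-- the full sweep: rank list = strictly-below counts, position by position
lemma rank_eq_countP (kcs : List Char) :
    ((PySem.List.sorted (List.range kcs.length) (fun i => kcs.getD i ' ') false).foldl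
        (sweepStep kcs) (List.replicate kcs.length 0, 0, none, 0)).1
      = kcs.map (fun kc => kcs.countP (fun c => decide (c < kc))) := by
  have hperm_range : (PySem.List.sorted (List.range kcs.length) (fun i => kcs.getD i ' ') false).Perm
      (List.range kcs.length) :=
    PySem.List.sorted_perm (List.range kcs.length) _ _
  have hrange_map : (List.range kcs.length).map (fun i => kcs.getD i ' ') = kcs := by
    apply List.ext_getElem
    · simp
    · intro i h1 h2
      simp only [List.getElem_map, List.getElem_range]
      rw [List.getD_eq_getElem _ _ (by simpa using h1)]
  have hinv := sweep_inv kcs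
    (PySem.List.sorted (List.range kcs.length) (fun i => kcs.getD i ' ') false)
    [] (List.replicate kcs.length 0) 0 none
    (by simpa using PySem.List.sorted_map_key_pairwise (List.range kcs.length) (fun i => kcs.getD i ' '))
    (by
      simp only [List.nil_append]
      exact (hperm_range.map _).trans (by rw [hrange_map]))
    (by
      intro b hb
      rw [List.length_replicate]
      exact List.mem_range.mp (hperm_range.mem_iff.mp hb))
    (fun _ => ⟨rfl, rfl⟩)
    (fun p hp => by cases hp)
  simp only [List.length_nil] at hinv
  apply List.ext_getElem?
  intro i
  rw [hinv.2 i]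
  by_cases hi : i < kcs.length
  · have him : i ∈ PySem.List.sorted (List.range kcs.length) (fun i => kcs.getD i ' ') false :=
      hperm_range.mem_iff.mpr (List.mem_range.mpr hi)
    rw [if_pos him, List.getElem?_map, List.getElem?_eq_getElem hi]
    simp only [List.getD_eq_getElem _ _ hi, Option.map_some]
  · have him : i ∉ PySem.List.sorted (List.range kcs.length) (fun i => kcs.getD i ' ') false :=
      fun h => hi (List.mem_range.mp (hperm_range.mem_iff.mp h))
    rw [if_neg him, List.getElem?_eq_none (by simpa using hi),
      List.getElem?_eq_none (by simpa using hi)]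

-- B's aux string equals A's aux string (both in the closed countP form)
lemma aux_B_eq_countP (kcs : List Char) :
    (((PySem.List.sorted (List.range kcs.length) (fun i => kcs.getD i ' ') false).foldl
        (sweepStep kcs) (List.replicate kcs.length 0, 0, none, 0)).1).map
      (fun r => Char.ofNat (66 + r))
      = kcs.map (fun kc => Char.ofNat (66 + kcs.countP (fun c => decide (c < kc)))) := by
  rw [rank_eq_countP, List.map_map]
  rfl

-- B's cycling-index loop computes A's x % len(newKey) indexing
lemma vigLoopB_eq_map (newKey : List Int) (moff : Int) :
    ∀ (cs : List Char) (i : Nat), i < newKey.length →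
      vigLoopB newKey moff cs i = (List.range cs.length).map (fun x =>
        PySem.Int.mod (newKey.getD ((i + x) % newKey.length) 0
          + (((cs.getD x ' ').toNat : Int) - moff)) 26) := by
  intro cs
  induction cs with
  | nil => intro i _; simp [vigLoopB]
  | cons ch rest ih =>
    intro i hi
    have hstep : (if i + 1 < newKey.length then i + 1 else 0) = (i + 1) % newKey.length := by
      split
      · rw [Nat.mod_eq_of_lt (by omega)]
      · have : i + 1 = newKey.length := by omega
        rw [this, Nat.mod_self]
    have hlt : (if i + 1 < newKey.length then i + 1 else 0) < newKey.length := by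
      split <;> omega
    rw [List.length_cons, List.range_succ_eq_map, List.map_cons, List.map_map]
    show _ :: _ = _ :: _
    refine congrArg₂ _ ?_ ?_
    · simp [Nat.mod_eq_of_lt hi]
    · rw [ih _ hlt, hstep]
      apply List.map_congr_left
      intro x hx
      simp only [Function.comp, List.getD_cons_succ, Nat.mod_add_mod]
      have harg : (i + 1 + x) % newKey.length = (i + x.succ) % newKey.length := by
        congr 1
        omega
      rw [harg]

lemma getD_map_sub (l : List Char) (off : Int) (x : Nat) (hx : x < l.length) :
    (l.map (fun c => (c.toNat : Int) - off)).getD x 0 = ((l.getD x ' ').toNat : Int) - off := by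
  rw [List.getD_eq_getElem _ _ (by simpa using hx), List.getD_eq_getElem _ _ hx]
  simp

-- ===== VERDICT (by name: the statement is the Claim_ definition above) =====
theorem sortedTabulaRecta_spec : Claim_equal_sortedTabulaRecta := by
  intro message key _hdom hpre
  unfold Spec_sortedTabulaRecta
  simp only [sortedTabulaRecta, sortedTabulaRecta_alt]
  rw [aux_A_eq_countP key.toList, aux_B_eq_countP key.toList]
  by_cases hk : key.toList = []
  · have hm : message.toList = [] := hpre.resolve_left (fun h => h hk)
    simp [hk, hm, ascii2Zset, pyStrIsupper, vigLoopB]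
  · rw [ascii2Zset_eq_map, ascii2Zset_eq_map message.toList]
    have hn : 0 < (((key.toList.map (fun kc => Char.ofNat (66 + key.toList.countP (fun c => decide (c < kc))))).map
        (fun c => (c.toNat : Int) - (if pyStrIsupper (key.toList.map (fun kc => Char.ofNat (66 + key.toList.countP (fun c => decide (c < kc))))) then 65 else 97)))).length := by
      simp only [List.length_map]
      exact List.length_pos_iff.mpr hk
    rw [vigLoopB_eq_map _ _ message.toList 0 hn]
    simp only [List.length_map]
    apply List.map_congr_left
    intro x hx
    have hxm : x < message.toList.length := List.mem_range.mp hx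
    simp only [Nat.zero_add]
    refine congrArg₂ (fun u v => PySem.Int.mod (u + v) 26) rfl ?_
    exact getD_map_sub message.toList _ x hxm
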